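-- pv_equiv track=rewrite | github.com/cwlinkem/linkuce | concatenator.py | fasta_to_nexus
-- ===== SOURCE A (Python) =====
-- def fasta_to_nexus(inp):
-- 	"""Takes a fasta file, pulls out GI and TI numbers and sequence."""
-- 	identifiers = []
-- 	sequences = []
-- 	current_seq = []
-- 	x = {}
-- 	for line in inp:
-- 		stripped = line.strip()
-- 		if line.startswith('>'):
-- 			if current_seq:
-- 				sequences.append(''.join(current_seq))
-- 			identifiers.append(stripped[1:])
-- 			current_seq = []
-- 		else:
-- 			if stripped:
-- 				current_seq.append(stripped)
--
-- 	if current_seq: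
-- 		sequences.append(''.join(current_seq))
--
-- 	assert(len(identifiers) == len(sequences))
--
--
-- 	return identifiers, sequences
-- ===== SOURCE B (Python) =====
-- def fasta_to_nexus(inp):
--     """Takes a fasta file, pulls out GI and TI numbers and sequence."""
--     identifiers = []
--     sequences = []
--     i = 0
--     n = len(inp)
--     while i < n:
--         is_header = inp[i].startswith('>')
--         j = i
--         while j < n and inp[j].startswith('>') == is_header:
--             j += 1
--         block = inp[i:j]
--         if is_header:
--             for line in block:
--                 identifiers.append(line.strip()[1:])
--         else:
--             joined = ''.join(line.strip() for line in block)
--             if joined: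
--                 sequences.append(joined)
--         i = j
--     assert(len(identifiers) == len(sequences))
--     return identifiers, sequences
-- ===== Notes on version B (the rewrite author's own statement) =====
-- stated objective: alternative
-- what changed: Replaces A's line-by-line state machine (carrying a current_seq accumulator that is lazily flushed at the next header or at EOF) by a two-level block decomposition: an outer loop splits the input into maximal runs of header / non-header lines, header runs extend identifiers directly and each sequence run is joined and appended at once, so no cross-iteration accumulator exists.
import Mathlib
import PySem

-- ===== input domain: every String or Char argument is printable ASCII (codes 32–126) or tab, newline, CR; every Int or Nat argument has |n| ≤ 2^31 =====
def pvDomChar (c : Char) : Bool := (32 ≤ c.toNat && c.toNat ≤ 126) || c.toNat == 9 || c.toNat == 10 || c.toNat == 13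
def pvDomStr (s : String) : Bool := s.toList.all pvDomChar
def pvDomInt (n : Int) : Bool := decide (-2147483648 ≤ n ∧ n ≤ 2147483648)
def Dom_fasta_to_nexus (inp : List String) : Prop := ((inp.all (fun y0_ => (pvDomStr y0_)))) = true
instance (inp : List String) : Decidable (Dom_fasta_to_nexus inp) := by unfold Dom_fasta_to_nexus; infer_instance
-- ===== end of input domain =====

-- B replaces A's line-by-line state machine (lazy current_seq accumulator flushed at the
-- next header or EOF) by a block decomposition: split the lines into maximal header /
-- non-header runs and process each run at once (objective: alternative, not faster).
-- Both Pythons end in 'assert len(identifiers) == len(sequences)'; the inputs on which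
-- that assert fails (AssertionError in BOTH programs) are exactly those excluded by Pre_.

-- shared one-line translations of 'line.startswith(">")' and 'line.strip()[1:]'
def pvHdr (l : String) : Bool := PySem.Str.startswith l ">"
def pvFId (l : String) : String := PySem.Str.slice (PySem.Str.strip l) (some 1) none

-- ===== PORT A =====
-- loop body of A: state = (identifiers, sequences, current_seq)
def pvStepA (st : List String × List String × List String) (line : String) :
    List String × List String × List String :=
  let stripped := PySem.Str.strip line
  if pvHdr line then
    (st.1 ++ [PySem.Str.slice stripped (some 1) none],
     (if st.2.2 ≠ [] then st.2.1 ++ [PySem.Str.join "" st.2.2] else st.2.1), [])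
  else if stripped ≠ "" then (st.1, st.2.1, st.2.2 ++ [stripped]) else st

-- the trailing 'assert' raises exactly outside Pre_ below; the port returns the pair
def fasta_to_nexus (inp : List String) : List String × List String :=
  let st := inp.foldl pvStepA ([], [], [])
  (st.1, if st.2.2 ≠ [] then st.2.1 ++ [PySem.Str.join "" st.2.2] else st.2.1)

-- ===== PORT B =====
-- Source B's outer while loop (explicit bound: it runs at most len(inp) times): split inp
-- into maximal runs of lines with the same pvHdr key (the inner 'while j < n' scan)
def pvRunsGo : Nat → List String → List (List String)
  | _, [] => []
  | 0, _ :: _ => []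
  | fuel + 1, l :: ls =>
    (l :: ls.takeWhile (fun x => pvHdr x == pvHdr l)) ::
      pvRunsGo fuel (ls.dropWhile (fun x => pvHdr x == pvHdr l))

def pvRuns (inp : List String) : List (List String) := pvRunsGo inp.length inp

-- Source B's per-block processing
def pvProc : List (List String) → List String × List String → List String × List String
  | [], st => st
  | g :: gs, st =>
    pvProc gs
      (match g with
       | [] => st
       | l :: _ =>
         if pvHdr l then (st.1 ++ g.map pvFId, st.2)
         else
           let s := PySem.Str.join "" (g.map PySem.Str.strip)
           if s ≠ "" then (st.1, st.2 ++ [s]) else st)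

def fasta_to_nexus_alt (inp : List String) : List String × List String :=
  pvProc (pvRuns inp) ([], [])

-- ===== PRECONDITION & SPEC =====
-- number of maximal header-delimited segments of the input that contain a non-blank
-- line (the Bool flag = "already inside a counted segment")
def pvCountBlocksAux : List String → Bool → Nat
  | [], _ => 0
  | l :: ls, inBlock =>
    if pvHdr l then pvCountBlocksAux ls false
    else if PySem.Str.strip l ≠ "" then (if inBlock then 0 else 1) + pvCountBlocksAux ls true
    else pvCountBlocksAux ls inBlock

def pvCountBlocks (inp : List String) : Nat := pvCountBlocksAux inp false

-- Pre_ excludes exactly the inputs on which the final 'assert len(identifiers) ==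
-- len(sequences)' fails, i.e. where BOTH A and B raise AssertionError: the number of
-- '>' header lines differs from the number of non-blank header-delimited segments.
def Pre_fasta_to_nexus (inp : List String) : Prop :=
  inp.countP pvHdr = pvCountBlocks inp
instance (inp : List String) : Decidable (Pre_fasta_to_nexus inp) := by
  unfold Pre_fasta_to_nexus; infer_instance

def pvWitness_fasta_to_nexus : List String := [">id1", "ACGT", "", ">id2", "TT", "GG"]

def Spec_fasta_to_nexus (inp : List String) (out : List String × List String) : Prop := out = fasta_to_nexus_alt inp
instance (inp : List String) (out : List String × List String) : Decidable (Spec_fasta_to_nexus inp out) := by unfold Spec_fasta_to_nexus; infer_instance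

-- ===== CLAIM (what is proved, stated in full; the proofs are below) =====
def Claim_equal_fasta_to_nexus : Prop := ∀ (inp : List String), Dom_fasta_to_nexus inp → Pre_fasta_to_nexus inp → Spec_fasta_to_nexus inp (fasta_to_nexus inp)

-- ===== LEMMAS AND PROOFS =====

-- A's flush of current_seq (performed at a header line and once more at the end)
def pvFlush (cur : List String) : List String :=
  if cur ≠ [] then [PySem.Str.join "" cur] else []

def pvFin (st : List String × List String × List String) : List String × List String :=
  (st.1, st.2.1 ++ pvFlush st.2.2)

theorem pvFin_eq (st : List String × List String × List String) :
    (st.1, if st.2.2 ≠ [] then st.2.1 ++ [PySem.Str.join "" st.2.2] else st.2.1) = pvFin st := by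
  by_cases h : st.2.2 = [] <;> simp [pvFin, pvFlush, h]

theorem pvStepA_hdr (st : List String × List String × List String) (l : String)
    (h : pvHdr l = true) :
    pvStepA st l = (st.1 ++ [pvFId l], st.2.1 ++ pvFlush st.2.2, []) := by
  by_cases hc : st.2.2 = [] <;> simp [pvStepA, pvFId, h, pvFlush, hc]

-- A over a run of header lines starting with an empty accumulator
theorem pvFoldA_hdrRun (g : List String) (hg : ∀ l ∈ g, pvHdr l = true) :
    ∀ ids seqs : List String,
      g.foldl pvStepA (ids, seqs, []) = (ids ++ g.map pvFId, seqs, []) := by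
  induction g with
  | nil => simp
  | cons l g ih =>
    intro ids seqs
    have hl : pvHdr l = true := hg l (by simp)
    rw [List.foldl_cons, pvStepA_hdr _ _ hl]
    simp only [pvFlush]
    rw [ih (fun x hx => hg x (by simp [hx]))]
    simp

-- A over a run of non-header lines: it only accumulates the non-blank strips
theorem pvFoldA_seqRun (g : List String) (hg : ∀ l ∈ g, pvHdr l = false) :
    ∀ ids seqs cur : List String,
      g.foldl pvStepA (ids, seqs, cur)
        = (ids, seqs, cur ++ (g.map PySem.Str.strip).filter (fun s => s != "")) := by
  induction g with
  | nil => simp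
  | cons l g ih =>
    intro ids seqs cur
    have hl : pvHdr l = false := hg l (by simp)
    rw [List.foldl_cons]
    by_cases hs : PySem.Str.strip l = "" <;>
      simp [pvStepA, hl, hs, ih (fun x hx => hg x (by simp [hx]))]

theorem pvCharsJoinNil (css : List (List Char)) : PySem.Chars.join [] css = css.flatten := by
  induction css with
  | nil => simp [PySem.Chars.join_nil]
  | cons p rest ih =>
    cases rest with
    | nil => simp [PySem.Chars.join_singleton]
    | cons q r => rw [PySem.Chars.join_cons_cons]; simp_all

theorem pvToListJoinEmpty (m : List String) :
    (PySem.Str.join "" m).toList = (m.map String.toList).flatten := by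
  rw [PySem.Str.toList_join]
  have h : ("" : String).toList = [] := by decide
  rw [h, pvCharsJoinNil]

theorem pvToListEqNil (s : String) : s.toList = [] ↔ s = "" := by
  rw [← String.toList_inj]
  have h : ("" : String).toList = [] := by decide
  rw [h]

-- dropping the empty strings does not change the joined string
theorem pvJoinFilter (m : List String) :
    PySem.Str.join "" (m.filter (fun s => s != "")) = PySem.Str.join "" m := by
  apply String.toList_inj.mp
  rw [pvToListJoinEmpty, pvToListJoinEmpty]
  induction m with
  | nil => rfl
  | cons s m ih =>
    by_cases hs : s = ""
    · simpa [hs, (pvToListEqNil s).mpr hs] using ih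
    · simp [hs, ih]

-- the joined string is empty iff no non-blank strip was collected
theorem pvJoinEmptyIff (m : List String) :
    m.filter (fun s => s != "") = [] ↔ PySem.Str.join "" m = "" := by
  rw [← pvToListEqNil, pvToListJoinEmpty, List.filter_eq_nil_iff, List.flatten_eq_nil_iff]
  constructor
  · intro h cs hcs
    rcases List.mem_map.mp hcs with ⟨s, hs, rfl⟩
    have hs' : s = "" := by simpa using h s hs
    exact (pvToListEqNil s).mpr hs'
  · intro h s hs
    have hs' : s.toList = [] := h _ (List.mem_map.mpr ⟨s, hs, rfl⟩)
    simp [(pvToListEqNil s).mp hs']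

-- the run splitter ignores its explicit bound as long as it is ≥ the list length
theorem pvRunsGo_congr (f1 : Nat) : ∀ (f2 : Nat) (inp : List String),
    inp.length ≤ f1 → inp.length ≤ f2 → pvRunsGo f1 inp = pvRunsGo f2 inp := by
  induction f1 with
  | zero =>
    intro f2 inp h1 _
    have : inp = [] := List.eq_nil_of_length_eq_zero (Nat.le_zero.mp h1)
    subst this
    cases f2 <;> rfl
  | succ f1 ih =>
    intro f2 inp h1 h2
    cases inp with
    | nil => cases f2 <;> rfl
    | cons l ls =>
      cases f2 with
      | zero => simp at h2
      | succ f2 =>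
        rw [pvRunsGo, pvRunsGo]
        congr 1
        apply ih
        · have := List.length_dropWhile_le (fun x => pvHdr x == pvHdr l) ls
          simp at h1; omega
        · have := List.length_dropWhile_le (fun x => pvHdr x == pvHdr l) ls
          simp at h2; omega

-- one step of the run decomposition
theorem pvRuns_cons (l : String) (ls : List String) :
    pvRuns (l :: ls) =
      (l :: ls.takeWhile (fun x => pvHdr x == pvHdr l)) ::
        pvRuns (ls.dropWhile (fun x => pvHdr x == pvHdr l)) := by
  rw [pvRuns, List.length_cons, pvRunsGo, pvRuns]
  congr 1
  exact pvRunsGo_congr ls.length _ _ (List.length_dropWhile_le _ _) le_rfl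

-- head of dropWhile fails the predicate
theorem pvDropWhileHead {p : String → Bool} {ls : List String} {x : String} {d : List String}
    (h : ls.dropWhile p = x :: d) : p x = false := by
  have := List.head?_dropWhile_not p ls
  rw [h] at this
  simpa using this

-- MAIN INVARIANT: running A's loop from state (ids, seqs, cur) over inp and flushing
-- equals B's block processing of inp started from (ids, seqs ++ pvFlush cur), provided
-- inp is empty, starts with a header, or cur is empty (the only states A's loop reaches).
theorem pvMain (n : Nat) : ∀ inp : List String, inp.length ≤ n →
    ∀ ids seqs cur : List String,
    (inp = [] ∨ cur = [] ∨ (∃ l t, inp = l :: t ∧ pvHdr l = true)) →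
    pvFin (inp.foldl pvStepA (ids, seqs, cur)) = pvProc (pvRuns inp) (ids, seqs ++ pvFlush cur) := by
  induction n with
  | zero =>
    intro inp hlen ids seqs cur _
    have : inp = [] := List.eq_nil_of_length_eq_zero (Nat.le_zero.mp hlen)
    subst this
    simp [pvRuns, pvRunsGo, pvProc, pvFin]
  | succ n ih =>
    intro inp hlen ids seqs cur H
    cases inp with
    | nil => simp [pvRuns, pvRunsGo, pvProc, pvFin]
    | cons l ls =>
      have hsplit : ls.takeWhile (fun x => pvHdr x == pvHdr l) ++
          ls.dropWhile (fun x => pvHdr x == pvHdr l) = ls := List.takeWhile_append_dropWhile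
      have hld : (ls.dropWhile (fun x => pvHdr x == pvHdr l)).length ≤ n := by
        have h1 := List.length_dropWhile_le (fun x => pvHdr x == pvHdr l) ls
        have h2 : ls.length ≤ n := by simpa using hlen
        omega
      have hfold : (l :: ls).foldl pvStepA (ids, seqs, cur)
          = (ls.dropWhile (fun x => pvHdr x == pvHdr l)).foldl pvStepA
              ((l :: ls.takeWhile (fun x => pvHdr x == pvHdr l)).foldl pvStepA (ids, seqs, cur)) := by
        conv_lhs => rw [show l :: ls = (l :: ls.takeWhile (fun x => pvHdr x == pvHdr l)) ++
          ls.dropWhile (fun x => pvHdr x == pvHdr l) by rw [List.cons_append, hsplit]]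
        rw [List.foldl_append]
      have ht_mem : ∀ x ∈ ls.takeWhile (fun x => pvHdr x == pvHdr l), pvHdr x = pvHdr l := by
        intro x hx
        simpa using List.mem_takeWhile_imp hx
      by_cases hl : pvHdr l = true
      · -- header run
        rw [hfold, List.foldl_cons, pvStepA_hdr _ _ hl,
          pvFoldA_hdrRun _ (fun x hx => by rw [ht_mem x hx]; exact hl),
          ih _ hld _ _ [] (Or.inr (Or.inl rfl)),
          pvRuns_cons, pvProc]
        simp [hl, pvFlush]
      · -- sequence run: A's loop only reaches this state with cur = []
        have hl' : pvHdr l = false := by simpa using hl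
        have hcur : cur = [] := by
          rcases H with h | h | ⟨x, t', hx, hhx⟩
          · exact absurd h (by simp)
          · exact h
          · rw [List.cons.injEq] at hx
            rw [← hx.1] at hhx
            rw [hhx] at hl'
            simp at hl'
        subst hcur
        have hseq : ∀ x ∈ l :: ls.takeWhile (fun x => pvHdr x == pvHdr l), pvHdr x = false := by
          intro x hx
          rcases List.mem_cons.mp hx with h | h
          · rw [h]; exact hl'
          · rw [ht_mem x h]; exact hl'
        have hdok : ls.dropWhile (fun x => pvHdr x == pvHdr l) = [] ∨
            (((l :: ls.takeWhile (fun x => pvHdr x == pvHdr l)).map PySem.Str.strip).filter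
              (fun s => s != "")) = [] ∨
            (∃ x t', ls.dropWhile (fun x => pvHdr x == pvHdr l) = x :: t' ∧ pvHdr x = true) := by
          cases hdc : ls.dropWhile (fun x => pvHdr x == pvHdr l) with
          | nil => exact Or.inl rfl
          | cons x d' =>
            refine Or.inr (Or.inr ⟨x, d', rfl, ?_⟩)
            have hx := pvDropWhileHead hdc
            simp [hl'] at hx
            exact hx
        rw [hfold, pvFoldA_seqRun _ hseq, List.nil_append,
          ih _ hld _ _ _ hdok, pvRuns_cons, pvProc]
        rw [if_neg (show ¬ (pvHdr l = true) by simp [hl'])]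
        rw [show pvFlush ([] : List String) = [] from by simp [pvFlush], List.append_nil]
        congr 1
        change _ = if PySem.Str.join "" ((l :: ls.takeWhile (fun x => pvHdr x == pvHdr l)).map
            PySem.Str.strip) ≠ "" then
            ((ids, seqs).1, (ids, seqs).2 ++ [PySem.Str.join ""
              ((l :: ls.takeWhile (fun x => pvHdr x == pvHdr l)).map PySem.Str.strip)])
          else (ids, seqs)
        by_cases hse : PySem.Str.join "" ((l :: ls.takeWhile (fun x => pvHdr x == pvHdr l)).map
            PySem.Str.strip) = ""
        · rw [if_neg (not_not_intro hse), (pvJoinEmptyIff _).mpr hse]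
          rw [show pvFlush ([] : List String) = [] from by simp [pvFlush], List.append_nil]
        · rw [if_pos hse]
          have h0 : (((l :: ls.takeWhile (fun x => pvHdr x == pvHdr l)).map PySem.Str.strip).filter
              (fun s => s != "")) ≠ [] := fun h => hse ((pvJoinEmptyIff _).mp h)
          rw [pvFlush, if_pos h0, pvJoinFilter]

-- ===== VERDICT (by name: the statement is the Claim_ definition above) =====
theorem fasta_to_nexus_spec : Claim_equal_fasta_to_nexus := by
  intro inp _ _
  show fasta_to_nexus inp = fasta_to_nexus_alt inp
  unfold fasta_to_nexus fasta_to_nexus_alt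
  rw [pvFin_eq]
  simpa [pvFlush] using pvMain inp.length inp le_rfl [] [] [] (Or.inr (Or.inl rfl))
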